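-- pv_equiv track=rewrite | github.com/justjacobrosario/BS_Computer_Science_UPD_Repo | 1st Year 1st Sem/python test drive/lab5/a.py | movie_highlights
-- ===== SOURCE A (Python) =====
-- def movie_highlights(excite_values):
--     dic = {}
--
--     for i in range(len(excite_values)):
--         for j in range(i, len(excite_values)):
--             if i == j:
--                 if excite_values[i] not in dic:
--                     dic[excite_values[i]] = 1
--                 else:
--                     dic[excite_values[i]] += 1
--             else:
--                 if sorted(excite_values[i:j+1], reverse = True)[0] not in dic:
--                     dic[sorted(excite_values[i:j+1], reverse = True)[0]] = 1
--                 else: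
--                     dic[sorted(excite_values[i:j+1], reverse = True)[0]] += 1
--     return dic
-- ===== SOURCE B (Python) =====
-- def movie_highlights(excite_values):
--     dic = {}
--     n = len(excite_values)
--     for i in range(n):
--         running = excite_values[i]
--         for j in range(i, n):
--             if excite_values[j] > running:
--                 running = excite_values[j]
--             dic[running] = dic.get(running, 0) + 1
--     return dic
-- ===== Notes on version B (the rewrite author's own statement) =====
-- stated objective: faster
-- what changed: Replaced sorting a fresh slice for every (i,j) pair with a running maximum maintained per start index, and the not-in/else dict branches with a single dict.get counter update.
import Mathlib
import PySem

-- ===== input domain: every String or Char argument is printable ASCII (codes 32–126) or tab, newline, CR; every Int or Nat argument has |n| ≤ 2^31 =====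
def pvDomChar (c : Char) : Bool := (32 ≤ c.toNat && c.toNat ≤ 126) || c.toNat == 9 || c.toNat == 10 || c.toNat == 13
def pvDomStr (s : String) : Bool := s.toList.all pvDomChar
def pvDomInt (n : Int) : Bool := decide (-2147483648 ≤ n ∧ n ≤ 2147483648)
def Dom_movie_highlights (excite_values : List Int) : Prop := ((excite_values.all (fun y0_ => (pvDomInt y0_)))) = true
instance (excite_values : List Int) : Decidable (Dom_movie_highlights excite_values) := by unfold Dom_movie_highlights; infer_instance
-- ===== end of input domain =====

-- B replaces A's per-(i,j) sort of a fresh slice by a running maximum per start index (O(n^2) vs O(n^3 log n)).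

-- ===== PORT A =====
-- literal port of Source A: nested index loops; for each pair (i,j) the subarray maximum is
-- taken as sorted(excite_values[i:j+1], reverse=True)[0] (the i == j case reads the element
-- directly), then counted into the dict with the 'not in / else' branches.
def movie_highlights (excite_values : List Int) : List (Int × Int) :=
  ((PySem.List.pyRange 0 excite_values.length 1).foldl (fun dic i =>
    (PySem.List.pyRange i excite_values.length 1).foldl (fun dic j =>
      if i == j then
        let k := PySem.List.pyGetD excite_values i 0
        if dic.contains k = false then dic.insert k 1
        else dic.insert k (dic.getD k 0 + 1)
      else
        let k := PySem.List.pyGetD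
          (PySem.List.sorted (PySem.List.slice excite_values (some i) (some (j + 1))) (fun x => x) true) 0 0
        if dic.contains k = false then dic.insert k 1
        else dic.insert k (dic.getD k 0 + 1)) dic)
   (PySem.Dict.empty : PySem.Dict Int Int)).items

-- ===== PORT B =====
-- literal port of Source B: for each start i keep a running maximum while j sweeps right,
-- counting it with dic[running] = dic.get(running, 0) + 1.
def movie_highlights_alt (excite_values : List Int) : List (Int × Int) :=
  ((PySem.List.pyRange 0 excite_values.length 1).foldl (fun dic i =>
    ((PySem.List.pyRange i excite_values.length 1).foldl
      (fun (st : Int × PySem.Dict Int Int) j =>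
        let x := PySem.List.pyGetD excite_values j 0
        let running := if st.1 < x then x else st.1
        (running, st.2.insert running (st.2.getD running 0 + 1)))
      (PySem.List.pyGetD excite_values i 0, dic)).2)
   (PySem.Dict.empty : PySem.Dict Int Int)).items

-- ===== PRECONDITION & SPEC =====
def Spec_movie_highlights (excite_values : List Int) (out : List (Int × Int)) : Prop := out = movie_highlights_alt excite_values
instance (excite_values : List Int) (out : List (Int × Int)) : Decidable (Spec_movie_highlights excite_values out) := by unfold Spec_movie_highlights; infer_instance

-- ===== CLAIM (what is proved, stated in full; the proofs are below) =====
def Claim_equal_movie_highlights : Prop := ∀ (excite_values : List Int), Dom_movie_highlights excite_values → Spec_movie_highlights excite_values (movie_highlights excite_values)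

-- ===== LEMMAS AND PROOFS =====

def sufMax : Int → List Int → List Int
  | _, [] => []
  | c, x :: xs => (max c x) :: sufMax (max c x) xs

theorem sortedDescHead (x : Int) (t : List Int) :
    PySem.List.pyGetD (PySem.List.sorted (x :: t) (fun v => v) true) 0 0 = t.foldl max x := by
  have hne : PySem.List.sorted (x :: t) (fun v : Int => v) true ≠ [] := by
    simp [PySem.List.sorted_eq_nil_iff]
  obtain ⟨m, tl, hmt⟩ := List.exists_cons_of_ne_nil hne
  rw [hmt, PySem.List.pyGetD_zero_cons]
  have hperm := PySem.List.sorted_perm (xs := x :: t) (key := fun v : Int => v) (rev := true)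
  have hmem : m ∈ x :: t := hperm.mem_iff.1 (by rw [hmt]; exact List.mem_cons_self ..)
  have hge := PySem.List.key_head_sorted_rev_ge (xs := x :: t) (key := fun v : Int => v) hmt
  have h1 : t.foldl max x ≤ m := by
    rcases PySem.List.foldl_max_mem t x with h | h
    · rw [h]; exact hge x (List.mem_cons_self ..)
    · exact hge _ (List.mem_cons_of_mem _ h)
  have h2 : m ≤ t.foldl max x := by
    rcases List.mem_cons.1 hmem with h | h
    · rw [h]; exact (PySem.List.le_foldl_max t x).1
    · exact (PySem.List.le_foldl_max t x).2 m h
  omega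

theorem sufMax_eq_map_range (rest : List Int) : ∀ x : Int,
    x :: sufMax x rest = (List.range (rest.length + 1)).map (fun k => (rest.take k).foldl max x) := by
  induction rest with
  | nil => intro x; simp [sufMax]
  | cons r rr ih =>
    intro x
    rw [show (r :: rr).length + 1 = (rr.length + 1) + 1 by simp, List.range_succ_eq_map]
    simp only [List.map_cons, List.take_zero, List.foldl_nil, List.map_map]
    rw [sufMax, ih (max x r)]
    refine congrArg _ (List.map_congr_left fun k _ => ?_)
    simp [List.take_succ_cons]

theorem innerB_snd :
    ∀ (xs : List Int) (c : Int) (d : PySem.Dict Int Int),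
    (xs.foldl (fun (st : Int × PySem.Dict Int Int) x =>
        let running := if st.1 < x then x else st.1
        (running, st.2.insert running (st.2.getD running 0 + 1))) (c, d)).2
      = (sufMax c xs).foldl (fun d k => d.insert k (d.getD k 0 + 1)) d := by
  intro xs
  induction xs with
  | nil => intro c d; simp [sufMax]
  | cons x t ih =>
    intro c d
    have hmax : (if c < x then x else c) = max c x := by
      rcases lt_or_ge c x with h | h
      · simp [h, max_eq_right h.le]
      · simp [not_lt.2 h, max_eq_left h]
    simp only [List.foldl_cons, sufMax, hmax]
    exact ih (max c x) (d.insert (max c x) (d.getD (max c x) 0 + 1))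

theorem keys_eq (e : List Int) (a : Nat) (ha : a < e.length) :
    (PySem.List.pyRange (a : Int) (e.length : Int) 1).map (fun j =>
       if (a : Int) == j then PySem.List.pyGetD e (a : Int) 0
       else PySem.List.pyGetD (PySem.List.sorted (PySem.List.slice e (some (a : Int)) (some (j + 1))) (fun x => x) true) 0 0)
    = sufMax (PySem.List.pyGetD e (a : Int) 0) (e.drop a) := by
  have hg : PySem.List.pyGetD e (a : Int) 0 = e[a] := by
    rw [PySem.List.pyGetD_natCast, List.getD_eq_getElem e 0 ha]
  have hdrop : e.drop a = e[a] :: e.drop (a + 1) := List.drop_eq_getElem_cons ha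
  set rest := e.drop (a + 1) with hrest
  have hlen : ((e.length : Int) - (a : Int)).toNat = rest.length + 1 := by
    have : rest.length = e.length - (a + 1) := by simp [hrest]
    omega
  rw [hg, hdrop, show sufMax e[a] (e[a] :: rest) = e[a] :: sufMax e[a] rest by simp [sufMax],
      sufMax_eq_map_range rest e[a], PySem.List.pyRange_one, List.map_map, hlen]
  refine List.map_congr_left fun k hk => ?_
  have hk' : k < rest.length + 1 := List.mem_range.1 hk
  cases k with
  | zero => simp
  | succ k' =>
    have hbne : ((a : Int) == (a : Int) + (k' + 1 : Nat)) = false := by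
      simp; omega
    simp only [Function.comp_apply, hbne, Bool.false_eq_true, if_false]
    have hcast : (a : Int) + ((k' + 1 : Nat) : Int) + 1 = ((a + k' + 2 : Nat) : Int) := by push_cast; ring
    rw [hcast, PySem.List.slice_natCast,
        show a + k' + 2 - a = k' + 2 by omega,
        show (e.drop a).take (k' + 2) = e[a] :: rest.take (k' + 1) by rw [hdrop]; rfl,
        sortedDescHead]
theorem step_eq (d : PySem.Dict Int Int) (k : Int) :
    (if d.contains k = false then d.insert k 1 else d.insert k (d.getD k 0 + 1))
      = d.insert k (d.getD k 0 + 1) := by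
  by_cases h : d.contains k = false
  · have : d.getD k 0 = 0 := by
      simp only [PySem.Dict.getD]
      rw [(PySem.Dict.get?_eq_none_iff_contains d k).2 h]
      rfl
    simp [h, this]
  · simp [h]

theorem ports_eq (e : List Int) : movie_highlights e = movie_highlights_alt e := by
  unfold movie_highlights movie_highlights_alt
  congr 1
  apply PySem.List.foldl_congr_mem
  intro d i hi
  obtain ⟨h0, hn⟩ := (PySem.List.mem_pyRange_one).1 hi
  -- B side: fold over e.drop i.toNat, then key list
  rw [PySem.List.foldl_pyRange_pyGetD' e 0
       (f := fun (st : Int × PySem.Dict Int Int) x =>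
        let running := if st.1 < x then x else st.1
        (running, st.2.insert running (st.2.getD running 0 + 1)))
       (PySem.List.pyGetD e i 0, d) h0,
      innerB_snd]
  -- A side: each inner step is a counter insert of a key
  have hA : (PySem.List.pyRange i (e.length : Int) 1).foldl (fun dic j =>
      if i == j then
        let k := PySem.List.pyGetD e i 0
        if dic.contains k = false then dic.insert k 1 else dic.insert k (dic.getD k 0 + 1)
      else
        let k := PySem.List.pyGetD (PySem.List.sorted (PySem.List.slice e (some i) (some (j + 1))) (fun x => x) true) 0 0
        if dic.contains k = false then dic.insert k 1 else dic.insert k (dic.getD k 0 + 1)) d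
    = ((PySem.List.pyRange i (e.length : Int) 1).map (fun j =>
        if i == j then PySem.List.pyGetD e i 0
        else PySem.List.pyGetD (PySem.List.sorted (PySem.List.slice e (some i) (some (j + 1))) (fun x => x) true) 0 0)).foldl
        (fun d k => d.insert k (d.getD k 0 + 1)) d := by
    rw [List.foldl_map]
    apply PySem.List.foldl_congr_mem
    intro dic j _
    by_cases hij : i == j
    · simp only [hij, if_true, step_eq]
    · simp only [hij, Bool.false_eq_true, if_false, step_eq]
  rw [hA]
  have hi' : i = ((i.toNat : Nat) : Int) := (Int.toNat_of_nonneg h0).symm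
  rw [hi', keys_eq e i.toNat (by omega)]
  rw [Int.toNat_natCast]

-- ===== VERDICT (by name: the statement is the Claim_ definition above) =====
theorem movie_highlights_spec : Claim_equal_movie_highlights := by
  intro excite_values _
  unfold Spec_movie_highlights
  exact ports_eq excite_values
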